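-- pv_equiv track=rewrite | github.com/wood-dale-wang/project-ALU | src/ADDER/generate.py | generate_and_statements
-- ===== SOURCE A (Python) =====
-- def generate_and_statements(max_index=30,Gnum=0,Pstart=1):
--     """
--     Generate Verilog 'and' statements for PxG0[0] to PxG0[max_index]
--     This corresponds to i from 1 to max_index+1
--     """
--     lines = [f"  wire PxG{Gnum}[{max_index}:0];"]
--     for idx in range(0, max_index + 1):  # idx = 0 to 30
--         i = idx + 1  # because p1g0 corresponds to PxG0[0]
--         output = f"PxG{Gnum}[{idx}]"
--         # Build P inputs: P[i], P[i-1], ..., P[1]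
--         p_inputs = [f"P[{j+Pstart-1}]" for j in range(i, 0, -1)]  # from i down to 1
--         inputs = [output] + p_inputs + [f"G[{Gnum}]"]
--         input_str = ",".join(inputs)
--         instance_name = f"u_and_p{i+Pstart-1}g{Gnum}"
--         line = f"  and {instance_name}({input_str});"
--         lines.append(line)
--     return "\n".join(lines)
-- ===== SOURCE B (Python) =====
-- def generate_and_statements(max_index=30, Gnum=0, Pstart=1):
--     """Single pass carrying the growing comma-joined P-prefix string
--     instead of rebuilding the P-input list for every row."""
--     out = f"  wire PxG{Gnum}[{max_index}:0];"
--     pstr = ""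
--     for idx in range(max_index + 1):
--         p = idx + Pstart  # = (idx+1) + Pstart - 1
--         pstr = f"P[{p}]" if not pstr else f"P[{p}]," + pstr
--         out += f"\n  and u_and_p{p}g{Gnum}(PxG{Gnum}[{idx}],{pstr},G[{Gnum}]);"
--     return out
-- ===== Notes on version B (the rewrite author's own statement) =====
-- stated objective: alternative
-- what changed: B replaces A's per-row rebuild of the full P-input list (inner comprehension over range(i,0,-1) plus a join of the assembled list) by a single pass that carries the growing comma-joined P-prefix string across iterations and appends each formatted row directly to the output string.
import Mathlib
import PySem

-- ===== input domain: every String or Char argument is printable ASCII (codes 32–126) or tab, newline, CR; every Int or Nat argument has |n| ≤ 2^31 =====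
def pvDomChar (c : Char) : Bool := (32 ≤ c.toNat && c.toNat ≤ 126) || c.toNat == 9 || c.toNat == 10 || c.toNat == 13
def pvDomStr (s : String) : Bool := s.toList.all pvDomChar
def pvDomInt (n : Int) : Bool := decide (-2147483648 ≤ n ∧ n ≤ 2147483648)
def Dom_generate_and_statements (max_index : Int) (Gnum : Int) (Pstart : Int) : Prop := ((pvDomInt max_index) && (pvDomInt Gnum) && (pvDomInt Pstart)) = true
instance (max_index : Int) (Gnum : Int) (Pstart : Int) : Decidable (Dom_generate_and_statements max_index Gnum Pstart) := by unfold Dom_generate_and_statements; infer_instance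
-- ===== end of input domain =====

-- B replaces A's per-row rebuild of the P-input list (inner comprehension + join) by a single
-- pass that carries the growing comma-joined P-prefix string; same return value, alternative shape.

-- ===== PORT A =====
def generate_and_statements (max_index : Int) (Gnum : Int) (Pstart : Int) : String :=
  let lines : List String :=
    ["  wire PxG" ++ PySem.Int.toStr Gnum ++ "[" ++ PySem.Int.toStr max_index ++ ":0];"]
  let lines := (PySem.List.pyRange 0 (max_index + 1) 1).foldl
    (fun acc idx =>
      let i := idx + 1
      let output := "PxG" ++ PySem.Int.toStr Gnum ++ "[" ++ PySem.Int.toStr idx ++ "]"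
      let p_inputs := (PySem.List.pyRange i 0 (-1)).map
        (fun j => "P[" ++ PySem.Int.toStr (j + Pstart - 1) ++ "]")
      let inputs := [output] ++ p_inputs ++ ["G[" ++ PySem.Int.toStr Gnum ++ "]"]
      let input_str := PySem.Str.join "," inputs
      let instance_name := "u_and_p" ++ PySem.Int.toStr (i + Pstart - 1) ++ "g" ++ PySem.Int.toStr Gnum
      acc ++ ["  and " ++ instance_name ++ "(" ++ input_str ++ ");"])
    lines
  PySem.Str.join "\n" lines

-- ===== PORT B =====
def generate_and_statements_alt (max_index : Int) (Gnum : Int) (Pstart : Int) : String :=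
  let st := (PySem.List.pyRange 0 (max_index + 1) 1).foldl
    (fun (st : String × String) idx =>
      let p := idx + Pstart
      let pstr := if st.2 == "" then "P[" ++ PySem.Int.toStr p ++ "]"
                  else ("P[" ++ PySem.Int.toStr p ++ "],") ++ st.2
      (st.1 ++ ("\n  and u_and_p" ++ PySem.Int.toStr p ++ "g" ++ PySem.Int.toStr Gnum
          ++ "(PxG" ++ PySem.Int.toStr Gnum ++ "[" ++ PySem.Int.toStr idx ++ "],"
          ++ pstr ++ ",G[" ++ PySem.Int.toStr Gnum ++ "]);"), pstr))
    ("  wire PxG" ++ PySem.Int.toStr Gnum ++ "[" ++ PySem.Int.toStr max_index ++ ":0];", "")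
  st.1

-- ===== PRECONDITION & SPEC =====
def Spec_generate_and_statements (max_index : Int) (Gnum : Int) (Pstart : Int) (out : String) : Prop := out = generate_and_statements_alt max_index Gnum Pstart
instance (max_index : Int) (Gnum : Int) (Pstart : Int) (out : String) : Decidable (Spec_generate_and_statements max_index Gnum Pstart out) := by unfold Spec_generate_and_statements; infer_instance

-- ===== CLAIM (what is proved, stated in full; the proofs are below) =====
def Claim_equal_generate_and_statements : Prop := ∀ (max_index : Int) (Gnum : Int) (Pstart : Int), Dom_generate_and_statements max_index Gnum Pstart → Spec_generate_and_statements max_index Gnum Pstart (generate_and_statements max_index Gnum Pstart)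

-- ===== LEMMAS AND PROOFS =====

-- A's per-row line, exactly as A's loop body produces it
def pvLineA (Gnum Pstart idx : Int) : String :=
  "  and " ++ ("u_and_p" ++ PySem.Int.toStr (idx + 1 + Pstart - 1) ++ "g" ++ PySem.Int.toStr Gnum)
    ++ "(" ++ PySem.Str.join ","
        (["PxG" ++ PySem.Int.toStr Gnum ++ "[" ++ PySem.Int.toStr idx ++ "]"]
          ++ (PySem.List.pyRange (idx + 1) 0 (-1)).map
              (fun j => "P[" ++ PySem.Int.toStr (j + Pstart - 1) ++ "]")
          ++ ["G[" ++ PySem.Int.toStr Gnum ++ "]"]) ++ ");"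

-- the comma-joined P-prefix for rows with i = k (P inputs P[k+Pstart-1] ... P[Pstart])
def pvPs (Pstart k : Int) : String :=
  PySem.Str.join "," ((PySem.List.pyRange k 0 (-1)).map
    (fun j => "P[" ++ PySem.Int.toStr (j + Pstart - 1) ++ "]"))

theorem pv_toList_ne (s : String) (h : s.toList ≠ []) : s ≠ "" := by
  intro e; exact h (by simp [e])

theorem pv_join_singleton (sep x : String) : PySem.Str.join sep [x] = x := by
  apply String.toList_inj.mp
  simp [PySem.Str.toList_join, PySem.Chars.join_singleton]

theorem pv_join_cons (sep x : String) (ps : List String) (h : ps ≠ []) :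
    PySem.Str.join sep (x :: ps) = x ++ sep ++ PySem.Str.join sep ps := by
  cases ps with
  | nil => exact absurd rfl h
  | cons q rest =>
    apply String.toList_inj.mp
    simp [PySem.Str.toList_join, PySem.Chars.join_cons_cons, String.toList_append]

theorem pv_join_append_singleton (sep : String) (xs : List String) (h : xs ≠ []) (y : String) :
    PySem.Str.join sep (xs ++ [y]) = PySem.Str.join sep xs ++ sep ++ y := by
  induction xs with
  | nil => exact absurd rfl h
  | cons x xs ih =>
    cases xs with
    | nil => simp [pv_join_singleton, pv_join_cons]
    | cons q rest =>
      rw [List.cons_append, pv_join_cons sep x ((q :: rest) ++ [y]) (by simp),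
        pv_join_cons sep x (q :: rest) (by simp), ih (by simp)]
      simp [String.append_assoc]

-- pvPs is nonempty as soon as the range is (its first entry starts with 'P')
theorem pv_pvPs_ne (P k : Int) (hk : 0 < k) : pvPs P k ≠ "" := by
  unfold pvPs
  rw [PySem.List.pyRange_neg_one_cons hk, List.map_cons]
  apply pv_toList_ne
  cases h : (PySem.List.pyRange (k - 1) 0 (-1)).map (fun j => "P[" ++ PySem.Int.toStr (j + P - 1) ++ "]") with
  | nil => rw [pv_join_singleton]; simp [String.toList_append]
  | cons a l =>
    rw [pv_join_cons "," _ (a :: l) (by simp)]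
    simp [String.toList_append]

-- the incremental pstr update realises pvPs at the next row
theorem pv_pstr_step (P idx : Int) (hidx : 0 ≤ idx) :
    (if pvPs P idx == "" then "P[" ++ PySem.Int.toStr (idx + P) ++ "]"
     else ("P[" ++ PySem.Int.toStr (idx + P) ++ "],") ++ pvPs P idx) = pvPs P (idx + 1) := by
  have harg : idx + 1 + P - 1 = idx + P := by ring
  rcases lt_or_eq_of_le hidx with hpos | hzero
  · rw [if_neg (by simp [pv_pvPs_ne P idx hpos])]
    conv_rhs => unfold pvPs
    rw [PySem.List.pyRange_neg_one_cons (by omega : (0:Int) < idx + 1), List.map_cons,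
      show idx + 1 - 1 = idx from by ring,
      pv_join_cons "," _ _ (by
        intro hnil
        have hne := pv_pvPs_ne P idx hpos
        unfold pvPs at hne
        rw [hnil] at hne
        exact hne rfl), harg]
    show _ = _ ++ _ ++ pvPs P idx
    apply String.toList_inj.mp
    simp [String.toList_append]
  · have h0 : idx = 0 := hzero.symm
    subst h0
    rw [if_pos (by unfold pvPs; rw [PySem.List.pyRange_neg_one_eq_nil le_rfl]; rfl)]
    conv_rhs => unfold pvPs
    rw [show (0:Int) + 1 = 1 from rfl, PySem.List.pyRange_neg_one_cons (by omega : (0:Int) < 1),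
      show (1:Int) - 1 = 0 from rfl, PySem.List.pyRange_neg_one_eq_nil le_rfl]
    simp only [List.map_cons, List.map_nil, pv_join_singleton]
    rw [show (1:Int) + P - 1 = 0 + P from by ring]

-- B's formatted row equals A's, given the prefix string for the next row
theorem pv_line_eq (G P idx : Int) (hidx : 0 ≤ idx) :
    "  and u_and_p" ++ PySem.Int.toStr (idx + P) ++ "g" ++ PySem.Int.toStr G
      ++ "(PxG" ++ PySem.Int.toStr G ++ "[" ++ PySem.Int.toStr idx ++ "],"
      ++ pvPs P (idx + 1) ++ ",G[" ++ PySem.Int.toStr G ++ "]);"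
    = pvLineA G P idx := by
  have hps : (PySem.List.pyRange (idx + 1) 0 (-1)).map
      (fun j => "P[" ++ PySem.Int.toStr (j + P - 1) ++ "]") ≠ [] := by
    rw [PySem.List.pyRange_neg_one_cons (by omega : (0:Int) < idx + 1)]
    simp
  unfold pvLineA
  rw [List.singleton_append,
    pv_join_append_singleton ","
      (("PxG" ++ PySem.Int.toStr G ++ "[" ++ PySem.Int.toStr idx ++ "]") ::
        (PySem.List.pyRange (idx + 1) 0 (-1)).map
          (fun j => "P[" ++ PySem.Int.toStr (j + P - 1) ++ "]"))
      (by simp) ("G[" ++ PySem.Int.toStr G ++ "]"),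
    pv_join_cons "," ("PxG" ++ PySem.Int.toStr G ++ "[" ++ PySem.Int.toStr idx ++ "]") _ hps,
    show idx + 1 + P - 1 = idx + P from by ring]
  have hpv : pvPs P (idx + 1) = PySem.Str.join ","
      ((PySem.List.pyRange (idx + 1) 0 (-1)).map
        (fun j => "P[" ++ PySem.Int.toStr (j + P - 1) ++ "]")) := rfl
  rw [hpv]
  apply String.toList_inj.mp
  simp [String.toList_append]

-- the single-pass loop invariant: B's state after the first n rows
theorem pv_inv (G P : Int) (h : String) (n : Nat) :
    (PySem.List.pyRange 0 (n : Int) 1).foldl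
      (fun (st : String × String) idx =>
        let p := idx + P
        let pstr := if st.2 == "" then "P[" ++ PySem.Int.toStr p ++ "]"
                    else ("P[" ++ PySem.Int.toStr p ++ "],") ++ st.2
        (st.1 ++ ("\n  and u_and_p" ++ PySem.Int.toStr p ++ "g" ++ PySem.Int.toStr G
            ++ "(PxG" ++ PySem.Int.toStr G ++ "[" ++ PySem.Int.toStr idx ++ "],"
            ++ pstr ++ ",G[" ++ PySem.Int.toStr G ++ "]);"), pstr))
      (h, "")
    = (PySem.Str.join "\n" (h :: (PySem.List.pyRange 0 (n : Int) 1).map (pvLineA G P)),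
       pvPs P (n : Int)) := by
  induction n with
  | zero =>
    simp only [Nat.cast_zero]
    rw [PySem.List.pyRange_one_eq_nil le_rfl]
    conv_rhs => unfold pvPs
    rw [PySem.List.pyRange_neg_one_eq_nil le_rfl]
    simp [pv_join_singleton]
    rfl
  | succ n ih =>
    rw [show ((n + 1 : Nat) : Int) = (n : Int) + 1 from by push_cast; ring,
      PySem.List.pyRange_one_succ_right (by positivity), List.foldl_append, ih]
    simp only [List.foldl_cons, List.foldl_nil]
    rw [pv_pstr_step P (n : Int) (by positivity)]
    refine Prod.ext ?_ rfl
    simp only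
    rw [List.map_append, List.map_singleton, ← List.cons_append,
      pv_join_append_singleton "\n" _ (by simp) _, ← pv_line_eq G P (n : Int) (by positivity)]
    apply String.toList_inj.mp
    simp [String.toList_append]

-- ===== VERDICT (by name: the statement is the Claim_ definition above) =====
theorem generate_and_statements_spec : Claim_equal_generate_and_statements := by
  intro m G P _
  show generate_and_statements m G P = generate_and_statements_alt m G P
  unfold generate_and_statements generate_and_statements_alt
  simp only []
  by_cases hle : m + 1 ≤ 0
  · rw [PySem.List.pyRange_one_eq_nil hle]
    simp [pv_join_singleton]
  · rw [show m + 1 = (((m + 1).toNat : Nat) : Int) from (Int.toNat_of_nonneg (by omega)).symm,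
      pv_inv G P _ (m + 1).toNat, PySem.List.foldl_append_singleton_eq_map]
    rfl
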